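-- pv_equiv track=rewrite | github.com/NLP-course-project-2023/BiDAF | src/data_preparation/preprocessing.py | remove_space_and_char
-- ===== SOURCE A (Python) =====
-- def remove_space_and_char(edit_column,remaining_chars):
--     rchars = remaining_chars.copy()
--     new_edit_column = ""
--     to_del = []
--     # Loop over each character in the string
--     for i in range(len(edit_column)):
--         # If the character is not a space or it is the first character of the string,
--         # append it to the result string
--         if edit_column[i] != " " or i == 0 or edit_column[i-1] != " ":
--             new_edit_column += edit_column[i]
--         # If the character is a space and the previous character was a space,
--         # append a single space to the result string
--         elif edit_column[i-1] == " ":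
--             to_del.append(i-1)
--
--     for index in sorted(to_del, reverse=True):
--         del rchars[index]
--     return new_edit_column,rchars
-- ===== SOURCE B (Python) =====
-- def remove_space_and_char(edit_column, remaining_chars):
--     # One forward pass: build the compressed string and the set of positions to
--     # drop; then filter remaining_chars by index in a single comprehension.
--     chars = []
--     drop = set()
--     prev_space = False
--     for i, ch in enumerate(edit_column):
--         if ch == " " and prev_space:
--             drop.add(i - 1)
--         else:
--             chars.append(ch)
--         prev_space = ch == " "
--     return "".join(chars), [c for j, c in enumerate(remaining_chars) if j not in drop]
-- ===== Notes on version B (the rewrite author's own statement) =====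
-- stated objective: alternative
-- what changed: A makes two passes (collect doubled-space positions, then sort them and repeatedly `del` from a copy, each deletion shifting the tail); B does one forward scan with a prev-space flag building the string and a set of drop positions, then filters remaining_chars by index in a single comprehension.
import Mathlib
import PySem

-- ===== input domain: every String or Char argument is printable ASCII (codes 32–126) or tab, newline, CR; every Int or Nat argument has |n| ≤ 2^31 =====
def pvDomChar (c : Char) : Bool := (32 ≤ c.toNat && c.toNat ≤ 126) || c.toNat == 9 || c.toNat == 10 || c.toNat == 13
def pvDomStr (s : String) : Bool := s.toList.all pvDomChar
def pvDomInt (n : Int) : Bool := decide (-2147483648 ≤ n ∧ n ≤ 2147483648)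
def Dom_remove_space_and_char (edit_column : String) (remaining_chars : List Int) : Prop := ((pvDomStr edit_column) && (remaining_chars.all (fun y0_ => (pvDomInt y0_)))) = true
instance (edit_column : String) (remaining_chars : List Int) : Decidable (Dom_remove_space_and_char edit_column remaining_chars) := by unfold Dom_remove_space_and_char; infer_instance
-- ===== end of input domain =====

-- B folds A's two passes (collect to_del, then reverse-order `del`) into one forward scan with a
-- prev-space flag plus a single index-filtering comprehension over remaining_chars; equivalence is
-- about the return value only (neither program mutates its arguments observably: A copies).

-- ===== PORT A =====
-- 'del rchars[index]': PySem.List.pop? gives (removed, rest); none = IndexError, excluded by Pre_.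
def pyDelAt (l : List Int) (idx : Int) : List Int :=
  match PySem.List.pop? l idx with
  | some r => r.2
  | none => l  -- unreachable under Pre_ (Python raises IndexError here)

def remove_space_and_char (edit_column : String) (remaining_chars : List Int) : String × List Int :=
  let s := edit_column.toList
  -- for i in range(len(edit_column)): build new_edit_column and to_del
  let p := (List.range s.length).foldl
    (fun (acc : List Char × List Int) i =>
      if s.getD i ' ' ≠ ' ' ∨ i = 0 ∨ s.getD (i-1) ' ' ≠ ' ' then
        (acc.1 ++ [s.getD i ' '], acc.2)
      else
        (acc.1, acc.2 ++ [(i : Int) - 1]))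
    ([], [])
  -- for index in sorted(to_del, reverse=True): del rchars[index]
  let rchars := (PySem.List.sorted p.2 (fun x => x) true).foldl pyDelAt remaining_chars
  (String.ofList p.1, rchars)

-- ===== PORT B =====
-- state: (chars, drop set, prev_space)
def remove_space_and_char_alt (edit_column : String) (remaining_chars : List Int) : String × List Int :=
  let st := (PySem.List.enumerate edit_column.toList 0).foldl
    (fun (acc : List Char × PySem.Set Int × Bool) p =>
      if p.2 = ' ' ∧ acc.2.2 = true then
        (acc.1, PySem.Set.add acc.2.1 (p.1 - 1), decide (p.2 = ' '))
      else
        (acc.1 ++ [p.2], acc.2.1, decide (p.2 = ' ')))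
    ([], PySem.Set.empty, false)
  (String.ofList st.1,
   (PySem.List.enumerate remaining_chars 0).filterMap
     (fun q => if PySem.Set.contains st.2.1 q.1 then none else some q.2))

-- ===== PRECONDITION & SPEC =====
-- Pre_ excludes exactly the inputs on which A raises IndexError: a doubled space at position i
-- whose deletion index i-1 is not a valid index of remaining_chars.
def Pre_remove_space_and_char (edit_column : String) (remaining_chars : List Int) : Prop :=
  ∀ i, i < edit_column.toList.length →
    (edit_column.toList.getD i ' ' = ' ' ∧ i ≠ 0 ∧ edit_column.toList.getD (i-1) ' ' = ' ') →
    i - 1 < remaining_chars.length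
instance (edit_column : String) (remaining_chars : List Int) : Decidable (Pre_remove_space_and_char edit_column remaining_chars) := by unfold Pre_remove_space_and_char; infer_instance

def pvWitness_remove_space_and_char : String × List Int := ("a  b c", [0, 1, 2])

def Spec_remove_space_and_char (edit_column : String) (remaining_chars : List Int) (out : String × List Int) : Prop := out = remove_space_and_char_alt edit_column remaining_chars
instance (edit_column : String) (remaining_chars : List Int) (out : String × List Int) : Decidable (Spec_remove_space_and_char edit_column remaining_chars out) := by unfold Spec_remove_space_and_char; infer_instance

-- ===== CLAIM (what is proved, stated in full; the proofs are below) =====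
def Claim_equal_remove_space_and_char : Prop := ∀ (edit_column : String) (remaining_chars : List Int), Dom_remove_space_and_char edit_column remaining_chars → Pre_remove_space_and_char edit_column remaining_chars → Spec_remove_space_and_char edit_column remaining_chars (remove_space_and_char edit_column remaining_chars)

-- ===== LEMMAS AND PROOFS =====

-- prev-space flag Python maintains, expressed against the original string at index k
def prevAt (s : List Char) (k : Nat) : Bool := decide (k ≠ 0 ∧ s.getD (k-1) ' ' = ' ')

-- chars kept when scanning t with incoming prev-space flag
def keptOf : Bool → List Char → List Char
  | _, [] => []
  | prev, c :: cs =>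
      if c = ' ' ∧ prev = true then keptOf (decide (c = ' ')) cs
      else c :: keptOf (decide (c = ' ')) cs

-- deletion indices produced when scanning t starting at index k with incoming prev-space flag
def delsOf : Bool → Int → List Char → List Int
  | _, _, [] => []
  | prev, k, c :: cs =>
      if c = ' ' ∧ prev = true then (k - 1) :: delsOf (decide (c = ' ')) (k + 1) cs
      else delsOf (decide (c = ' ')) (k + 1) cs

theorem drop_cons_facts {s t : List Char} {c : Char} {k : Nat} (h : s.drop k = c :: t) :
    s.getD k ' ' = c ∧ s.drop (k+1) = t ∧ k < s.length := by
  have h0 : s[k]? = some c := by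
    have := congrArg (fun l => l[0]?) h
    simpa [List.getElem?_drop] using this
  refine ⟨by simp [List.getD_eq_getElem?_getD, h0], ?_, ?_⟩
  · have := congrArg List.tail h
    simpa [List.tail_drop] using this
  · exact (List.getElem?_eq_some_iff.mp h0).1

theorem prevAt_succ (s : List Char) (k : Nat) (c : Char) (hc : s.getD k ' ' = c) :
    prevAt s (k+1) = decide (c = ' ') := by
  unfold prevAt
  rw [Nat.add_sub_cancel, hc]
  simp

theorem afold_eq (s : List Char) : ∀ (t : List Char) (k : Nat) (acc : List Char × List Int),
    s.drop k = t →
    (List.range' k t.length).foldl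
      (fun (acc : List Char × List Int) i =>
        if s.getD i ' ' ≠ ' ' ∨ i = 0 ∨ s.getD (i-1) ' ' ≠ ' ' then
          (acc.1 ++ [s.getD i ' '], acc.2)
        else
          (acc.1, acc.2 ++ [(i : Int) - 1])) acc
    = (acc.1 ++ keptOf (prevAt s k) t, acc.2 ++ delsOf (prevAt s k) (k : Int) t) := by
  intro t
  induction t with
  | nil => intro k acc _; simp [keptOf, delsOf]
  | cons c t' ih =>
    intro k acc h
    obtain ⟨hc, hdrop, _⟩ := drop_cons_facts h
    have hcond : (s.getD k ' ' ≠ ' ' ∨ k = 0 ∨ s.getD (k-1) ' ' ≠ ' ')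
        ↔ ¬ (c = ' ' ∧ prevAt s k = true) := by
      unfold prevAt
      rw [hc]
      simp only [decide_eq_true_eq]
      tauto
    rw [List.length_cons, List.range'_succ, List.foldl_cons]
    by_cases hb : c = ' ' ∧ prevAt s k = true
    · have : ¬ (s.getD k ' ' ≠ ' ' ∨ k = 0 ∨ s.getD (k-1) ' ' ≠ ' ') := by
        rw [hcond]; exact not_not_intro hb
      rw [if_neg this, ih (k+1) _ hdrop]
      rw [prevAt_succ s k c hc]
      simp only [keptOf, delsOf, if_pos hb]
      have : (((k+1 : Nat)) : Int) = (k : Int) + 1 := by push_cast; ring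
      rw [this]
      simp [hb.1]
    · have : (s.getD k ' ' ≠ ' ' ∨ k = 0 ∨ s.getD (k-1) ' ' ≠ ' ') := hcond.mpr hb
      rw [if_pos this, ih (k+1) _ hdrop]
      rw [prevAt_succ s k c hc]
      simp only [keptOf, delsOf, if_neg hb]
      have : (((k+1 : Nat)) : Int) = (k : Int) + 1 := by push_cast; ring
      rw [this, hc]
      simp

theorem set_add_fresh (s : PySem.Set Int) (x : Int) (h : x ∉ s) :
    PySem.Set.add s x = s ++ [x] := by
  simp [PySem.Set.add, PySem.Set.contains, h]

theorem bfold_eq : ∀ (t : List Char) (k : Int) (acc : List Char × PySem.Set Int × Bool),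
    (∀ x ∈ acc.2.1, x < k - 1) →
    ((PySem.List.enumerate t k).foldl
      (fun (acc : List Char × PySem.Set Int × Bool) p =>
        if p.2 = ' ' ∧ acc.2.2 = true then
          (acc.1, PySem.Set.add acc.2.1 (p.1 - 1), decide (p.2 = ' '))
        else
          (acc.1 ++ [p.2], acc.2.1, decide (p.2 = ' '))) acc).1
      = acc.1 ++ keptOf acc.2.2 t
    ∧ ((PySem.List.enumerate t k).foldl
      (fun (acc : List Char × PySem.Set Int × Bool) p =>
        if p.2 = ' ' ∧ acc.2.2 = true then
          (acc.1, PySem.Set.add acc.2.1 (p.1 - 1), decide (p.2 = ' '))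
        else
          (acc.1 ++ [p.2], acc.2.1, decide (p.2 = ' '))) acc).2.1
      = acc.2.1 ++ delsOf acc.2.2 k t := by
  intro t
  induction t with
  | nil => intro k acc _; simp [keptOf, delsOf, PySem.List.enumerate]
  | cons c t' ih =>
    intro k acc hinv
    rw [PySem.List.enumerate_cons, List.foldl_cons]
    by_cases hb : c = ' ' ∧ acc.2.2 = true
    · rw [if_pos hb]
      have hfresh : (k - 1) ∉ acc.2.1 := fun hm => absurd (hinv _ hm) (by omega)
      have hadd := set_add_fresh acc.2.1 (k-1) hfresh
      have hinv' : ∀ x ∈ PySem.Set.add acc.2.1 (k-1), x < (k+1) - 1 := by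
        rw [hadd]; intro x hx
        rcases List.mem_append.mp hx with hx | hx
        · have := hinv _ hx; omega
        · simp at hx; omega
      obtain ⟨h1, h2⟩ := ih (k+1)
        (acc.1, PySem.Set.add acc.2.1 ((k, c).1 - 1), decide ((k, c).2 = ' ')) hinv'
      constructor
      · rw [h1]; simp only [keptOf, if_pos hb]
      · rw [h2, hadd]; simp only [delsOf, if_pos hb]; simp [hb.1]
    · rw [if_neg hb]
      have hinv' : ∀ x ∈ acc.2.1, x < (k+1) - 1 := by
        intro x hx; have := hinv _ hx; omega
      obtain ⟨h1, h2⟩ := ih (k+1)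
        (acc.1 ++ [(k, c).2], acc.2.1, decide ((k, c).2 = ' ')) hinv'
      constructor
      · rw [h1]; simp only [keptOf, if_neg hb]; simp
      · rw [h2]; simp only [delsOf, if_neg hb]

theorem delsOf_bounds : ∀ (t : List Char) (prev : Bool) (k : Int),
    ∀ x ∈ delsOf prev k t, k - 1 ≤ x ∧ x < k + t.length := by
  intro t
  induction t with
  | nil => intro prev k x hx; simp [delsOf] at hx
  | cons c t' ih =>
    intro prev k x hx
    simp only [delsOf] at hx
    split_ifs at hx with hb
    · rcases List.mem_cons.mp hx with hx | hx
      · subst hx; simp; omega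
      · have := ih _ (k+1) x hx; simp at *; omega
    · have := ih _ (k+1) x hx; simp at *; omega

theorem delsOf_pairwise : ∀ (t : List Char) (prev : Bool) (k : Int),
    (delsOf prev k t).Pairwise (· < ·) := by
  intro t
  induction t with
  | nil => intro prev k; simp [delsOf]
  | cons c t' ih =>
    intro prev k
    simp only [delsOf]
    split_ifs with hb
    · refine List.Pairwise.cons ?_ (ih _ _)
      intro y hy
      have := delsOf_bounds t' _ (k+1) y hy
      omega
    · exact ih _ _

theorem delsOf_spec (s : List Char) : ∀ (t : List Char) (k : Nat), s.drop k = t →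
    ∀ x ∈ delsOf (prevAt s k) (k : Int) t,
      ∃ i : Nat, i < s.length ∧ i ≠ 0 ∧ s.getD i ' ' = ' ' ∧ s.getD (i-1) ' ' = ' '
        ∧ x = (i : Int) - 1 := by
  intro t
  induction t with
  | nil => intro k _ x hx; simp [delsOf] at hx
  | cons c t' ih =>
    intro k h x hx
    obtain ⟨hc, hdrop, hklen⟩ := drop_cons_facts h
    simp only [delsOf] at hx
    split_ifs at hx with hb
    · rcases List.mem_cons.mp hx with hx | hx
      · refine ⟨k, hklen, ?_, by rw [hc]; exact hb.1, ?_, hx⟩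
        · have := hb.2; simp [prevAt] at this; exact this.1
        · have := hb.2; simp [prevAt] at this; exact this.2
      · have hx' : x ∈ delsOf (prevAt s (k+1)) ((k+1 : Nat) : Int) t' := by
          rw [prevAt_succ s k c hc]; push_cast; exact hx
        exact ih (k+1) hdrop x hx'
    · have hx' : x ∈ delsOf (prevAt s (k+1)) ((k+1 : Nat) : Int) t' := by
        rw [prevAt_succ s k c hc]; push_cast; exact hx
      exact ih (k+1) hdrop x hx'

theorem delAt_eq (l : List Int) (m : Nat) (hm : m < l.length) :
    pyDelAt l (m : Int) = l.eraseIdx m := by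
  simp [pyDelAt, PySem.List.pop?_natCast l m hm]

theorem delAt_append (l t : List Int) (x : Int) (h0 : 0 ≤ x) (hl : x < (l.length : Int)) :
    pyDelAt (l ++ t) x = pyDelAt l x ++ t := by
  obtain ⟨m, rfl⟩ : ∃ m : Nat, x = (m : Int) := ⟨x.toNat, (Int.toNat_of_nonneg h0).symm⟩
  have hm : m < l.length := by exact_mod_cast hl
  have hm' : m < (l ++ t).length := by simp; omega
  rw [delAt_eq _ _ hm, delAt_eq _ _ hm', List.eraseIdx_append_of_lt_length hm]

theorem foldrev_del_append : ∀ (ds l t : List Int),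
    ds.Pairwise (· < ·) → (∀ x ∈ ds, 0 ≤ x ∧ x < (l.length : Int)) →
    ds.reverse.foldl pyDelAt (l ++ t) = ds.reverse.foldl pyDelAt l ++ t := by
  intro ds
  induction ds using List.reverseRecOn with
  | nil => intro l t _ _; simp
  | append_singleton ds' d ihds =>
    intro l t hpw hbd
    have hd := hbd d (by simp)
    obtain ⟨m, rfl⟩ : ∃ m : Nat, d = (m : Int) := ⟨d.toNat, (Int.toNat_of_nonneg hd.1).symm⟩
    have hm : m < l.length := by exact_mod_cast hd.2
    have hlt : ∀ x ∈ ds', x < (m : Int) := by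
      intro x hx
      have := (List.pairwise_append.mp hpw).2.2 x hx (m : Int) (by simp)
      exact this
    have hpw' : ds'.Pairwise (· < ·) := (List.pairwise_append.mp hpw).1
    have hlen : (l.eraseIdx m).length = l.length - 1 := by
      rw [List.length_eraseIdx_of_lt hm]
    have hbd' : ∀ x ∈ ds', 0 ≤ x ∧ x < ((l.eraseIdx m).length : Int) := by
      intro x hx
      have h1 := hbd x (by simp [hx])
      have h2 := hlt x hx
      constructor
      · exact h1.1
      · rw [hlen]; omega
    rw [List.reverse_append, List.reverse_singleton, List.singleton_append, List.foldl_cons,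
        List.foldl_cons, delAt_append l t (m : Int) hd.1 hd.2, delAt_eq l m hm,
        ihds (l.eraseIdx m) t hpw' hbd']

theorem filterMap_keep_all (ds : List Int) : ∀ (t : List Int) (k : Int),
    (∀ x ∈ ds, x < k) →
    (PySem.List.enumerate t k).filterMap
      (fun q => if PySem.Set.contains ds q.1 then none else some q.2) = t := by
  intro t
  induction t with
  | nil => intro k _; simp [PySem.List.enumerate]
  | cons c t' ih =>
    intro k hk
    rw [PySem.List.enumerate_cons, List.filterMap_cons]
    have : PySem.Set.contains ds k = false := by
      simp [PySem.Set.contains]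
      intro hm; exact absurd (hk _ hm) (by omega)
    simp only [this]
    simp only [if_neg (by simp : ¬ (false = true))]
    rw [ih (k+1) (fun x hx => by have := hk x hx; omega)]

theorem del_eq_filter : ∀ (ds rc : List Int),
    ds.Pairwise (· < ·) → (∀ x ∈ ds, 0 ≤ x ∧ x < (rc.length : Int)) →
    ds.reverse.foldl pyDelAt rc
      = (PySem.List.enumerate rc 0).filterMap
          (fun q => if PySem.Set.contains ds q.1 then none else some q.2) := by
  intro ds
  induction ds using List.reverseRecOn with
  | nil =>
    intro rc _ _
    simp only [List.reverse_nil, List.foldl_nil]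
    exact (filterMap_keep_all [] rc 0 (by simp)).symm
  | append_singleton ds' d ihds =>
    intro rc hpw hbd
    have hd := hbd d (by simp)
    obtain ⟨m, rfl⟩ : ∃ m : Nat, d = (m : Int) := ⟨d.toNat, (Int.toNat_of_nonneg hd.1).symm⟩
    have hm : m < rc.length := by exact_mod_cast hd.2
    have hlt : ∀ x ∈ ds', x < (m : Int) :=
      fun x hx => (List.pairwise_append.mp hpw).2.2 x hx (m : Int) (by simp)
    have hpw' : ds'.Pairwise (· < ·) := (List.pairwise_append.mp hpw).1
    have htk : (rc.take m).length = m := by simp [Nat.min_eq_left (Nat.le_of_lt hm)]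
    have hbd' : ∀ x ∈ ds', 0 ≤ x ∧ x < ((rc.take m).length : Int) := by
      intro x hx
      refine ⟨(hbd x (by simp [hx])).1, ?_⟩
      rw [htk]; exact hlt x hx
    -- LHS: first delete index m, then the rest acts on the prefix
    have hsplit : rc.eraseIdx m = rc.take m ++ rc.drop (m+1) := List.eraseIdx_eq_take_drop_succ rc m
    have hlhs : (ds' ++ [(m : Int)]).reverse.foldl pyDelAt rc
        = (ds'.reverse.foldl pyDelAt (rc.take m)) ++ rc.drop (m+1) := by
      rw [List.reverse_append, List.reverse_singleton, List.singleton_append, List.foldl_cons,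
          delAt_eq rc m hm, hsplit, foldrev_del_append ds' _ _ hpw' hbd']
    rw [hlhs, ihds (rc.take m) hpw' hbd']
    -- RHS: split rc into take m ++ rc[m] :: drop (m+1)
    have hrc : rc = rc.take m ++ rc[m] :: rc.drop (m+1) := by
      conv_lhs => rw [← List.take_append_drop m rc]
      rw [List.drop_eq_getElem_cons hm]
    conv_rhs => rw [hrc]
    rw [PySem.List.enumerate_append, PySem.List.enumerate_cons, List.filterMap_append,
        List.filterMap_cons]
    have hcontains_d : PySem.Set.contains (ds' ++ [(m : Int)]) (0 + (rc.take m).length : Int) = true := by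
      simp [PySem.Set.contains, htk]
    rw [hcontains_d]
    simp only
    have hpart1 : (PySem.List.enumerate (rc.take m) 0).filterMap
          (fun q => if PySem.Set.contains (ds' ++ [(m : Int)]) q.1 then none else some q.2)
        = (PySem.List.enumerate (rc.take m) 0).filterMap
          (fun q => if PySem.Set.contains ds' q.1 then none else some q.2) := by
      apply List.filterMap_congr
      intro q hq
      obtain ⟨j, hj, rfl⟩ := (PySem.List.mem_enumerate_iff _ _ _).mp hq
      have hjm : (0 + (j : Int)) < (m : Int) := by
        rw [htk] at hj; omega
      have : PySem.Set.contains (ds' ++ [(m : Int)]) (0 + (j : Int))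
          = PySem.Set.contains ds' (0 + (j : Int)) := by
        simp only [PySem.Set.contains]
        simp
        intro h; exact absurd h (by omega)
      rw [this]
    rw [hpart1]
    have hpart3 : (PySem.List.enumerate (rc.drop (m+1)) (0 + (rc.take m).length + 1)).filterMap
          (fun q => if PySem.Set.contains (ds' ++ [(m : Int)]) q.1 then none else some q.2)
        = rc.drop (m+1) := by
      apply filterMap_keep_all
      intro x hx
      rw [htk]
      rcases List.mem_append.mp hx with hx | hx
      · have := hlt x hx; omega
      · simp at hx; omega
    rw [hpart3]
    simp

-- ===== VERDICT (by name: the statement is the Claim_ definition above) =====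
theorem remove_space_and_char_spec : Claim_equal_remove_space_and_char := by
  intro ec rc _dom hpre
  unfold Spec_remove_space_and_char
  simp only [remove_space_and_char, remove_space_and_char_alt]
  have hprev0 : prevAt ec.toList 0 = false := by simp [prevAt]
  have hA := afold_eq ec.toList ec.toList 0 ([], []) (by simp)
  rw [hprev0] at hA
  push_cast at hA
  have hpw : (delsOf false 0 ec.toList).Pairwise (· < ·) := delsOf_pairwise ec.toList false 0
  have hbd : ∀ x ∈ delsOf false 0 ec.toList, 0 ≤ x ∧ x < (rc.length : Int) := by
    intro x hx
    have hx' : x ∈ delsOf (prevAt ec.toList 0) ((0 : Nat) : Int) ec.toList := by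
      rw [hprev0]; push_cast; exact hx
    obtain ⟨i, hilen, hi0, hgi, hgi1, rfl⟩ := delsOf_spec ec.toList ec.toList 0 (by simp) x hx'
    have hlt := hpre i hilen ⟨hgi, hi0, hgi1⟩
    omega
  have hsorted : PySem.List.sorted (delsOf false 0 ec.toList) (fun x => x) true
      = (delsOf false 0 ec.toList).reverse := by
    apply PySem.List.sorted_rev_eq_of_perm_of_pairwise_gt
    · exact List.reverse_perm _
    · rw [List.pairwise_reverse]; exact hpw
  have hB := bfold_eq ec.toList 0 ([], PySem.Set.empty, false)
    (by intro x hx; simp [PySem.Set.empty] at hx)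
  simp only [List.nil_append] at hA hB
  rw [List.range_eq_range', hA]
  rw [hB.1, hB.2]
  rw [hsorted, del_eq_filter _ rc hpw hbd]
  simp [PySem.Set.empty]
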